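-- pv_equiv track=rewrite | github.com/verivital/behaverify | examples/ANSR/train_x_net.py | recursive_max
-- ===== SOURCE A (Python) =====
-- def recursive_max(cur_node, layer_index):
--     return (
--         ''
--         if cur_node < 0
--         else
--         (
--             ('x_net_node_' + str(layer_index) + '_' + str(cur_node))
--             if cur_node == 0
--             else
--             (
--                 ('(max, ' + 'x_net_node_' + str(layer_index) + '_' + str(cur_node) + ', ' +  'x_net_node_' + str(layer_index) + '_' + str(cur_node - 1) + ')')
--                 if cur_node == 1
--                 else
--                 (
--                     '(max, ' + 'x_net_node_' + str(layer_index) + '_' + str(cur_node) + ', ' + recursive_max(cur_node - 1, layer_index) + ')'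
--                 )
--             )
--         )
--     )
-- ===== SOURCE B (Python) =====
-- def recursive_max(cur_node, layer_index):
--     if cur_node < 0:
--         return ''
--     result = 'x_net_node_' + str(layer_index) + '_0'
--     for i in range(1, cur_node + 1):
--         result = '(max, x_net_node_' + str(layer_index) + '_' + str(i) + ', ' + result + ')'
--     return result
-- ===== Notes on version B (the rewrite author's own statement) =====
-- stated objective: simpler
-- what changed: Replaces the right-nested recursion (with separate n==0 and n==1 special cases) by a single inside-out loop that starts from the innermost node string and wraps it once per index.
import Mathlib
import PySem

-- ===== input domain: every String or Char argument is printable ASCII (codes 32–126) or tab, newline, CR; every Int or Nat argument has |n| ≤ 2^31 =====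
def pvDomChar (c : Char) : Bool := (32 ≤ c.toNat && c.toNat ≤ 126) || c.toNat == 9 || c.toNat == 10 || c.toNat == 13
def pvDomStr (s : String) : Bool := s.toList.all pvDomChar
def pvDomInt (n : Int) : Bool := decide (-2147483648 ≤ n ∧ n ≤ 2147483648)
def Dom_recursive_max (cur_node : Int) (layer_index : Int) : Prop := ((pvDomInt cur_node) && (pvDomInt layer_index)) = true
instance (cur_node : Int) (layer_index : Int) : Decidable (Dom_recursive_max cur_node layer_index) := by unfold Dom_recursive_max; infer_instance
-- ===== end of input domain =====

-- B replaces A's right-nested recursion (with its n==0/n==1 special cases) by one inside-out loop; objective: simpler.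

-- ===== PORT A =====
def recursive_max (cur_node : Int) (layer_index : Int) : String :=
  if cur_node < 0 then ""
  else if cur_node = 0 then
    "x_net_node_" ++ PySem.Int.toStr layer_index ++ "_" ++ PySem.Int.toStr cur_node
  else if cur_node = 1 then
    "(max, " ++ "x_net_node_" ++ PySem.Int.toStr layer_index ++ "_" ++ PySem.Int.toStr cur_node
      ++ ", " ++ "x_net_node_" ++ PySem.Int.toStr layer_index ++ "_" ++ PySem.Int.toStr (cur_node - 1) ++ ")"
  else
    "(max, " ++ "x_net_node_" ++ PySem.Int.toStr layer_index ++ "_" ++ PySem.Int.toStr cur_node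
      ++ ", " ++ recursive_max (cur_node - 1) layer_index ++ ")"
termination_by cur_node.toNat
decreasing_by omega

-- ===== PORT B =====
def recursive_max_alt (cur_node : Int) (layer_index : Int) : String :=
  if cur_node < 0 then ""
  else
    (PySem.List.pyRange 1 (cur_node + 1) 1).foldl
      (fun result i =>
        "(max, x_net_node_" ++ PySem.Int.toStr layer_index ++ "_" ++ PySem.Int.toStr i
          ++ ", " ++ result ++ ")")
      ("x_net_node_" ++ PySem.Int.toStr layer_index ++ "_0")

-- ===== PRECONDITION & SPEC =====
-- Pre_ excludes only cur_node >= 998, where Python A hits the interpreter recursion limit and raises RecursionError.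
def Pre_recursive_max (cur_node : Int) (layer_index : Int) : Prop := cur_node < 998
instance (cur_node : Int) (layer_index : Int) : Decidable (Pre_recursive_max cur_node layer_index) := by unfold Pre_recursive_max; infer_instance
def pvWitness_recursive_max : Int × Int := (5, 3)
def Spec_recursive_max (cur_node : Int) (layer_index : Int) (out : String) : Prop := out = recursive_max_alt cur_node layer_index
instance (cur_node : Int) (layer_index : Int) (out : String) : Decidable (Spec_recursive_max cur_node layer_index out) := by unfold Spec_recursive_max; infer_instance

-- ===== CLAIM (what is proved, stated in full; the proofs are below) =====
def Claim_equal_recursive_max : Prop := ∀ (cur_node : Int) (layer_index : Int), Dom_recursive_max cur_node layer_index → Pre_recursive_max cur_node layer_index → Spec_recursive_max cur_node layer_index (recursive_max cur_node layer_index)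

-- ===== LEMMAS AND PROOFS =====

lemma alt_succ (n : Int) (l : Int) (hn : 0 ≤ n) :
    recursive_max_alt (n + 1) l =
      "(max, x_net_node_" ++ PySem.Int.toStr l ++ "_" ++ PySem.Int.toStr (n + 1)
        ++ ", " ++ recursive_max_alt n l ++ ")" := by
  unfold recursive_max_alt
  rw [if_neg (by omega), if_neg (by omega)]
  rw [show n + 1 + 1 = (n + 1) + 1 from rfl,
      PySem.List.pyRange_one_succ_right (by omega : (1:Int) ≤ n + 1)]
  rw [List.foldl_append]
  rfl

lemma eq_on_nat (n : Nat) (l : Int) :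
    recursive_max (n : Int) l = recursive_max_alt (n : Int) l := by
  induction n with
  | zero =>
    unfold recursive_max recursive_max_alt
    norm_num [PySem.List.pyRange]
    apply String.toList_injective
    simp [show PySem.Int.toChars 0 = ['0'] from rfl]
  | succ k ih =>
    rcases Nat.eq_zero_or_pos k with hk | hk
    · subst hk
      unfold recursive_max
      rw [if_neg (by omega), if_neg (by omega), if_pos (by norm_num)]
      rw [show ((1:Nat) : Int) = (0:Int) + 1 by norm_num, alt_succ 0 l le_rfl]
      unfold recursive_max_alt
      norm_num [PySem.List.pyRange]
      apply String.toList_injective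
      simp [show PySem.Int.toChars 0 = ['0'] from rfl]
    · rw [show ((k + 1 : Nat) : Int) = (k : Int) + 1 by push_cast; ring,
          alt_succ (k : Int) l (by positivity)]
      rw [recursive_max]
      rw [if_neg (by omega), if_neg (by omega), if_neg (by omega)]
      rw [show (k : Int) + 1 - 1 = (k : Int) by ring, ih]
      apply String.toList_injective
      simp

-- ===== VERDICT (by name: the statement is the Claim_ definition above) =====
theorem recursive_max_spec : Claim_equal_recursive_max := by
  intro cur_node layer_index _ _
  unfold Spec_recursive_max
  rcases lt_or_ge cur_node 0 with h | h
  · rw [recursive_max, recursive_max_alt, if_pos h, if_pos h]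
  · obtain ⟨n, rfl⟩ := Int.eq_ofNat_of_zero_le h
    exact eq_on_nat n layer_index
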